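-- pv_equiv track=rewrite | github.com/fufywa/Text-Mining-trial-v1 | Text Mining_v1.py | step8_ngram_collapse
-- ===== SOURCE A (Python) =====
-- from typing import List, Tuple
--
-- NEGATION_TERMS = {"not", "never", "no", "without", "nothing", "none", "nobody"}
--
-- def step8_ngram_collapse(tokens: List[str]) -> List[str]:
--     out = []; i = 0
--     while i < len(tokens):
--         tok = tokens[i]
--         if "_" in tok:
--             out.append(tok); i += 1; continue
--         if tok == "not" and i + 1 < len(tokens):
--             nxt = tokens[i+1]
--             if nxt == "very" and i + 2 < len(tokens):
--                 tgt = tokens[i+2]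
--                 if "_" not in tgt and tgt not in NEGATION_TERMS:
--                     out.append(f"not_{tgt}"); i += 3; continue
--             if nxt not in NEGATION_TERMS and "_" not in nxt:
--                 out.append(f"not_{nxt}"); i += 2; continue
--         if tok == "very" and i + 1 < len(tokens):
--             nxt = tokens[i+1]
--             if nxt not in NEGATION_TERMS and nxt != "very" and "_" not in nxt:
--                 out.append(f"very_{nxt}"); i += 2; continue
--         out.append(tok); i += 1
--     return out
-- ===== SOURCE B (Python) =====
-- from typing import List
--
-- NEGATION_TERMS = {"not", "never", "no", "without", "nothing", "none", "nobody"}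
--
-- def step8_ngram_collapse(tokens: List[str]) -> List[str]:
--     out = []
--     pending = None  # None | "not" | "very" | "not_very"
--
--     def ok_not(t):
--         return t not in NEGATION_TERMS and "_" not in t
--
--     def ok_very(t):
--         return t not in NEGATION_TERMS and t != "very" and "_" not in t
--
--     def fresh(tok):
--         # process tok with no pending state; may start a new pending
--         if "_" in tok:
--             out.append(tok)
--             return None
--         if tok == "not":
--             return "not"
--         if tok == "very":
--             return "very"
--         out.append(tok)
--         return None
--
--     for tok in tokens:
--         if pending is None:
--             pending = fresh(tok)
--         elif pending == "not":
--             if tok == "very":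
--                 pending = "not_very"
--             elif ok_not(tok):
--                 out.append("not_" + tok)
--                 pending = None
--             else:
--                 out.append("not")
--                 pending = fresh(tok)
--         elif pending == "very":
--             if ok_very(tok):
--                 out.append("very_" + tok)
--                 pending = None
--             else:
--                 out.append("very")
--                 pending = fresh(tok)
--         else:  # "not_very"
--             if ok_not(tok):
--                 out.append("not_" + tok)
--                 pending = None
--             else:
--                 out.append("not_very")
--                 pending = fresh(tok)
--     if pending is not None:
--         out.append(pending)
--     return out
-- ===== Notes on version B (the rewrite author's own statement) =====
-- stated objective: simpler
-- what changed: Replaces A's index-jumping while loop with two-token lookahead by a single for loop over the tokens that keeps a pending 'not'/'very'/'not_very' state, resolving or flushing it on each new token and flushing once at the end.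
import Mathlib
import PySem

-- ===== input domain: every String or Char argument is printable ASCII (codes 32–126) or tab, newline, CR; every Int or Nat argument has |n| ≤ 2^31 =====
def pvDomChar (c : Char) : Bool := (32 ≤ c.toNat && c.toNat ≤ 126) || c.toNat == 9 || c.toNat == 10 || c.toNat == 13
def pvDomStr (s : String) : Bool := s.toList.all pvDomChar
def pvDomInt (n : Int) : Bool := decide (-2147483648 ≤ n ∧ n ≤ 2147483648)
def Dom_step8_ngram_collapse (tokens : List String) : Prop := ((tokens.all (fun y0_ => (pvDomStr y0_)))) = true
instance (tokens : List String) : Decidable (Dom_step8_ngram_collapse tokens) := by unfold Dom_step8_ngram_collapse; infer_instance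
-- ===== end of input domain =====

-- B replaces A's index-jumping while loop (lookahead of up to two tokens) by a single
-- token-by-token pass maintaining a pending "not"/"very"/"not_very" state; objective: simpler.

-- ===== PORT A =====
def pvNegTerms : List String := ["not", "never", "no", "without", "nothing", "none", "nobody"]

-- literal transliteration of A's while loop; the `continue`-guarded branch chain keeps
-- A's order and conditions (indexing is guarded by the bounds tests, so getD is exact)
def pvLoopA (tokens : List String) (out : List String) (i : Nat) : List String :=
  if i < tokens.length then
    if PySem.Str.isIn "_" (tokens.getD i "") then
      pvLoopA tokens (out ++ [tokens.getD i ""]) (i + 1)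
    else if tokens.getD i "" = "not" ∧ i + 1 < tokens.length
            ∧ tokens.getD (i+1) "" = "very" ∧ i + 2 < tokens.length
            ∧ PySem.Str.isIn "_" (tokens.getD (i+2) "") = false
            ∧ tokens.getD (i+2) "" ∉ pvNegTerms then
      pvLoopA tokens (out ++ ["not_" ++ tokens.getD (i+2) ""]) (i + 3)
    else if tokens.getD i "" = "not" ∧ i + 1 < tokens.length
            ∧ tokens.getD (i+1) "" ∉ pvNegTerms
            ∧ PySem.Str.isIn "_" (tokens.getD (i+1) "") = false then
      pvLoopA tokens (out ++ ["not_" ++ tokens.getD (i+1) ""]) (i + 2)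
    else if tokens.getD i "" = "very" ∧ i + 1 < tokens.length
            ∧ tokens.getD (i+1) "" ∉ pvNegTerms
            ∧ tokens.getD (i+1) "" ≠ "very"
            ∧ PySem.Str.isIn "_" (tokens.getD (i+1) "") = false then
      pvLoopA tokens (out ++ ["very_" ++ tokens.getD (i+1) ""]) (i + 2)
    else
      pvLoopA tokens (out ++ [tokens.getD i ""]) (i + 1)
  else out
termination_by tokens.length - i
decreasing_by all_goals omega

def step8_ngram_collapse (tokens : List String) : List String :=
  pvLoopA tokens [] 0

-- ===== PORT B =====
inductive Pend : Type
  | none | pnot | pvery | pnotvery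
deriving DecidableEq, Repr

def pvOkNot (t : String) : Bool :=
  !(pvNegTerms.contains t) && !(PySem.Str.isIn "_" t)

def pvOkVery (t : String) : Bool :=
  !(pvNegTerms.contains t) && t != "very" && !(PySem.Str.isIn "_" t)

-- process a token with no pending state; may start a new pending
def pvFresh (out : List String) (tok : String) : List String × Pend :=
  if PySem.Str.isIn "_" tok then (out ++ [tok], .none)
  else if tok == "not" then (out, .pnot)
  else if tok == "very" then (out, .pvery)
  else (out ++ [tok], .none)

def pvStepB (out : List String) (p : Pend) (tok : String) : List String × Pend :=
  match p with
  | .none => pvFresh out tok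
  | .pnot =>
    if tok == "very" then (out, .pnotvery)
    else if pvOkNot tok then (out ++ ["not_" ++ tok], .none)
    else pvFresh (out ++ ["not"]) tok
  | .pvery =>
    if pvOkVery tok then (out ++ ["very_" ++ tok], .none)
    else pvFresh (out ++ ["very"]) tok
  | .pnotvery =>
    if pvOkNot tok then (out ++ ["not_" ++ tok], .none)
    else pvFresh (out ++ ["not_very"]) tok

def pvFlushB : Pend → List String
  | .none => []
  | .pnot => ["not"]
  | .pvery => ["very"]
  | .pnotvery => ["not_very"]

def step8_ngram_collapse_alt (tokens : List String) : List String :=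
  let s := tokens.foldl (fun st tok => pvStepB st.1 st.2 tok) ([], Pend.none)
  s.1 ++ pvFlushB s.2

-- ===== PRECONDITION & SPEC =====
def Spec_step8_ngram_collapse (tokens : List String) (out : List String) : Prop := out = step8_ngram_collapse_alt tokens
instance (tokens : List String) (out : List String) : Decidable (Spec_step8_ngram_collapse tokens out) := by unfold Spec_step8_ngram_collapse; infer_instance

-- ===== CLAIM (what is proved, stated in full; the proofs are below) =====
def Claim_equal_step8_ngram_collapse : Prop := ∀ (tokens : List String), Dom_step8_ngram_collapse tokens → Spec_step8_ngram_collapse tokens (step8_ngram_collapse tokens)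

-- ===== LEMMAS AND PROOFS =====

theorem pvOkNot_iff (t : String) :
    pvOkNot t = true ↔ (t ∉ pvNegTerms ∧ PySem.Str.isIn "_" t = false) := by
  unfold pvOkNot
  cases h : PySem.Str.isIn "_" t <;> simp [h]

theorem pvOkVery_iff (t : String) :
    pvOkVery t = true ↔ (t ∉ pvNegTerms ∧ t ≠ "very" ∧ PySem.Str.isIn "_" t = false) := by
  unfold pvOkVery
  cases h : PySem.Str.isIn "_" t <;> simp [h, and_assoc]

theorem pvFresh_under (out : List String) (t : String) (h : PySem.Str.isIn "_" t = true) :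
    pvFresh out t = (out ++ [t], .none) := by
  unfold pvFresh; rw [if_pos h]

theorem pvFresh_not (out : List String) : pvFresh out "not" = (out, .pnot) := by
  unfold pvFresh; rw [if_neg (by decide), if_pos (by decide)]

theorem pvFresh_very (out : List String) : pvFresh out "very" = (out, .pvery) := by
  unfold pvFresh; rw [if_neg (by decide), if_neg (by decide), if_pos (by decide)]

theorem pvFresh_other (out : List String) (t : String)
    (h : PySem.Str.isIn "_" t = false) (h1 : t ≠ "not") (h2 : t ≠ "very") :
    pvFresh out t = (out ++ [t], .none) := by
  unfold pvFresh
  rw [if_neg (by intro hc; rw [h] at hc; exact absurd hc Bool.false_ne_true),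
      if_neg (by simpa using h1), if_neg (by simpa using h2)]

theorem pvStepB_none (out : List String) (t : String) :
    pvStepB out .none t = pvFresh out t := rfl

theorem pvStepB_pnot_very (out : List String) :
    pvStepB out .pnot "very" = (out, .pnotvery) := by
  simp only [pvStepB]; rw [if_pos (by decide)]

theorem pvStepB_pnot_ok (out : List String) (t : String)
    (h : pvOkNot t = true) (hne : t ≠ "very") :
    pvStepB out .pnot t = (out ++ ["not_" ++ t], .none) := by
  simp only [pvStepB]; rw [if_neg (by simpa using hne), if_pos h]

theorem pvStepB_pnot_bad (out : List String) (t : String) (h : pvOkNot t = false) :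
    pvStepB out .pnot t = pvFresh (out ++ ["not"]) t := by
  have hne : t ≠ "very" := by intro e; rw [e] at h; exact absurd h (by decide)
  simp only [pvStepB]
  rw [if_neg (by simpa using hne),
      if_neg (by intro hc; rw [h] at hc; exact absurd hc Bool.false_ne_true)]

theorem pvStepB_pvery_ok (out : List String) (t : String) (h : pvOkVery t = true) :
    pvStepB out .pvery t = (out ++ ["very_" ++ t], .none) := by
  simp only [pvStepB]; rw [if_pos h]

theorem pvStepB_pvery_bad (out : List String) (t : String) (h : pvOkVery t = false) :
    pvStepB out .pvery t = pvFresh (out ++ ["very"]) t := by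
  simp only [pvStepB]
  rw [if_neg (by intro hc; rw [h] at hc; exact absurd hc Bool.false_ne_true)]

theorem pvStepB_pnotvery_ok (out : List String) (t : String) (h : pvOkNot t = true) :
    pvStepB out .pnotvery t = (out ++ ["not_" ++ t], .none) := by
  simp only [pvStepB]; rw [if_pos h]

theorem pvStepB_pnotvery_bad (out : List String) (t : String) (h : pvOkNot t = false) :
    pvStepB out .pnotvery t = pvFresh (out ++ ["not_very"]) t := by
  simp only [pvStepB]
  rw [if_neg (by intro hc; rw [h] at hc; exact absurd hc Bool.false_ne_true)]

def pvRunB (out : List String) (p : Pend) (l : List String) : List String :=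
  let s := l.foldl (fun st tok => pvStepB st.1 st.2 tok) (out, p)
  s.1 ++ pvFlushB s.2

theorem pvRunB_nil (out : List String) (p : Pend) :
    pvRunB out p [] = out ++ pvFlushB p := rfl

theorem pvRunB_cons (out : List String) (p : Pend) (t : String) (l : List String) :
    pvRunB out p (t :: l) = pvRunB (pvStepB out p t).1 (pvStepB out p t).2 l := rfl

-- one resolved fold step
theorem pvRunB_step (out out' : List String) (p p' : Pend) (t : String) (l : List String)
    (h : pvStepB out p t = (out', p')) :
    pvRunB out p (t :: l) = pvRunB out' p' l := by
  rw [pvRunB_cons, h]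

-- a flushing fold step: pending is emitted literally and the token is reprocessed fresh
theorem pvRunB_flush (out out' : List String) (p : Pend) (t : String) (l : List String)
    (h : pvStepB out p t = pvFresh out' t) :
    pvRunB out p (t :: l) = pvRunB out' .none (t :: l) := by
  rw [pvRunB_cons, h, ← pvStepB_none, ← pvRunB_cons]

theorem pvDrop_cons (tokens : List String) (i : Nat) (h : i < tokens.length) :
    tokens.drop i = tokens.getD i "" :: tokens.drop (i + 1) := by
  rw [List.drop_eq_getElem_cons h, List.getD_eq_getElem tokens "" h]

theorem pvMain (tokens : List String) (n : Nat) :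
    ∀ i out, tokens.length - i ≤ n →
      pvLoopA tokens out i = pvRunB out .none (tokens.drop i) := by
  induction n with
  | zero =>
    intro i out h
    rw [pvLoopA, if_neg (by omega), List.drop_eq_nil_of_le (by omega), pvRunB_nil]
    simp [pvFlushB]
  | succ n ih =>
    intro i out h
    by_cases hi : i < tokens.length
    · rw [pvLoopA, if_pos hi]
      by_cases hU : PySem.Str.isIn "_" (tokens.getD i "") = true
      · -- underscore token: both append literally
        rw [if_pos hU, ih (i+1) _ (by omega), pvDrop_cons tokens i hi,
            pvRunB_step _ _ _ _ _ _ ((pvStepB_none _ _).trans (pvFresh_under _ _ hU))]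
      · have hUf : PySem.Str.isIn "_" (tokens.getD i "") = false := Bool.eq_false_iff.mpr hU
        rw [if_neg hU]
        by_cases hnot : tokens.getD i "" = "not"
        · -- tok = "not"
          have hstep0 : pvStepB out .none (tokens.getD i "") = (out, .pnot) := by
            rw [hnot, pvStepB_none, pvFresh_not]
          by_cases h1 : i + 1 < tokens.length
          · by_cases hveq : tokens.getD (i+1) "" = "very"
            · -- "not very …"
              have hstep1 : pvStepB out .pnot (tokens.getD (i+1) "") = (out, .pnotvery) := by
                rw [hveq, pvStepB_pnot_very]
              by_cases h2 : i + 2 < tokens.length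
              · by_cases hok : pvOkNot (tokens.getD (i+2) "") = true
                · -- "not very tgt" collapses to "not_tgt"
                  obtain ⟨hm, hu⟩ := (pvOkNot_iff _).mp hok
                  rw [if_pos ⟨hnot, h1, hveq, h2, hu, hm⟩, ih (i+3) _ (by omega),
                      pvDrop_cons tokens i hi, pvRunB_step _ _ _ _ _ _ hstep0,
                      pvDrop_cons tokens (i+1) h1, pvRunB_step _ _ _ _ _ _ hstep1,
                      pvDrop_cons tokens (i+2) h2,
                      pvRunB_step _ _ _ _ _ _ (pvStepB_pnotvery_ok _ _ hok)]
                · -- tgt unusable: A emits "not_very" and restarts at tgt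
                  have hokf : pvOkNot (tokens.getD (i+2) "") = false := Bool.eq_false_iff.mpr hok
                  rw [if_neg (by rintro ⟨-, -, -, -, hu, hm⟩
                                 exact hok ((pvOkNot_iff _).mpr ⟨hm, hu⟩)),
                      if_pos ⟨hnot, h1, by rw [hveq]; decide, by rw [hveq]; decide⟩,
                      ih (i+2) _ (by omega),
                      pvDrop_cons tokens i hi, pvRunB_step _ _ _ _ _ _ hstep0,
                      pvDrop_cons tokens (i+1) h1, pvRunB_step _ _ _ _ _ _ hstep1,
                      pvDrop_cons tokens (i+2) h2,
                      pvRunB_flush _ _ _ _ _ (pvStepB_pnotvery_bad _ _ hokf),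
                      hveq, show ("not_" ++ "very" : String) = "not_very" from by decide]
              · -- "not very" ends the input: emits "not_very"
                rw [if_neg (by rintro ⟨-, -, -, h2', -⟩; exact h2 h2'),
                    if_pos ⟨hnot, h1, by rw [hveq]; decide, by rw [hveq]; decide⟩,
                    ih (i+2) _ (by omega),
                    pvDrop_cons tokens i hi, pvRunB_step _ _ _ _ _ _ hstep0,
                    pvDrop_cons tokens (i+1) h1, pvRunB_step _ _ _ _ _ _ hstep1,
                    List.drop_eq_nil_of_le (by omega), pvRunB_nil, pvRunB_nil,
                    hveq, show ("not_" ++ "very" : String) = "not_very" from by decide]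
                simp [pvFlushB]
            · -- nxt ≠ "very"
              by_cases hok : pvOkNot (tokens.getD (i+1) "") = true
              · -- "not nxt" collapses
                obtain ⟨hm, hu⟩ := (pvOkNot_iff _).mp hok
                rw [if_neg (by rintro ⟨-, -, hv, -⟩; exact hveq hv),
                    if_pos ⟨hnot, h1, hm, hu⟩, ih (i+2) _ (by omega),
                    pvDrop_cons tokens i hi, pvRunB_step _ _ _ _ _ _ hstep0,
                    pvDrop_cons tokens (i+1) h1,
                    pvRunB_step _ _ _ _ _ _ (pvStepB_pnot_ok _ _ hok hveq)]
              · -- nxt unusable: A emits bare "not", B flushes its pending "not"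
                have hokf : pvOkNot (tokens.getD (i+1) "") = false := Bool.eq_false_iff.mpr hok
                rw [if_neg (by rintro ⟨-, -, hv, -⟩; exact hveq hv),
                    if_neg (by rintro ⟨-, -, hm, hu⟩
                               exact hok ((pvOkNot_iff _).mpr ⟨hm, hu⟩)),
                    if_neg (by rintro ⟨hv, -⟩; rw [hnot] at hv; exact absurd hv (by decide)),
                    ih (i+1) _ (by omega),
                    pvDrop_cons tokens i hi, pvRunB_step _ _ _ _ _ _ hstep0,
                    pvDrop_cons tokens (i+1) h1,
                    pvRunB_flush _ _ _ _ _ (pvStepB_pnot_bad _ _ hokf), hnot]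
          · -- "not" is the last token
            rw [if_neg (by rintro ⟨-, h1', -⟩; exact h1 h1'),
                if_neg (by rintro ⟨-, h1', -⟩; exact h1 h1'),
                if_neg (by rintro ⟨-, h1', -⟩; exact h1 h1'),
                ih (i+1) _ (by omega),
                pvDrop_cons tokens i hi, pvRunB_step _ _ _ _ _ _ hstep0,
                List.drop_eq_nil_of_le (by omega), pvRunB_nil, pvRunB_nil, hnot]
            simp [pvFlushB]
        · -- tok ≠ "not"
          rw [if_neg (by rintro ⟨hn, -⟩; exact hnot hn),
              if_neg (by rintro ⟨hn, -⟩; exact hnot hn)]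
          by_cases hvery : tokens.getD i "" = "very"
          · -- tok = "very"
            have hstep0 : pvStepB out .none (tokens.getD i "") = (out, .pvery) := by
              rw [hvery, pvStepB_none, pvFresh_very]
            by_cases h1 : i + 1 < tokens.length
            · by_cases hok : pvOkVery (tokens.getD (i+1) "") = true
              · -- "very nxt" collapses
                obtain ⟨hm, hnv, hu⟩ := (pvOkVery_iff _).mp hok
                rw [if_pos ⟨hvery, h1, hm, hnv, hu⟩, ih (i+2) _ (by omega),
                    pvDrop_cons tokens i hi, pvRunB_step _ _ _ _ _ _ hstep0,
                    pvDrop_cons tokens (i+1) h1,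
                    pvRunB_step _ _ _ _ _ _ (pvStepB_pvery_ok _ _ hok)]
              · -- nxt unusable: A emits bare "very", B flushes its pending "very"
                have hokf : pvOkVery (tokens.getD (i+1) "") = false := Bool.eq_false_iff.mpr hok
                rw [if_neg (by rintro ⟨-, -, hm, hnv, hu⟩
                               exact hok ((pvOkVery_iff _).mpr ⟨hm, hnv, hu⟩)),
                    ih (i+1) _ (by omega),
                    pvDrop_cons tokens i hi, pvRunB_step _ _ _ _ _ _ hstep0,
                    pvDrop_cons tokens (i+1) h1,
                    pvRunB_flush _ _ _ _ _ (pvStepB_pvery_bad _ _ hokf), hvery]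
            · -- "very" is the last token
              rw [if_neg (by rintro ⟨-, h1', -⟩; exact h1 h1'),
                  ih (i+1) _ (by omega),
                  pvDrop_cons tokens i hi, pvRunB_step _ _ _ _ _ _ hstep0,
                  List.drop_eq_nil_of_le (by omega), pvRunB_nil, pvRunB_nil, hvery]
              simp [pvFlushB]
          · -- ordinary token: both append literally
            rw [if_neg (by rintro ⟨hv, -⟩; exact hvery hv),
                ih (i+1) _ (by omega), pvDrop_cons tokens i hi,
                pvRunB_step _ _ _ _ _ _
                  ((pvStepB_none _ _).trans (pvFresh_other _ _ hUf hnot hvery))]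
    · rw [pvLoopA, if_neg hi, List.drop_eq_nil_of_le (by omega), pvRunB_nil]
      simp [pvFlushB]

-- ===== VERDICT (by name: the statement is the Claim_ definition above) =====
theorem step8_ngram_collapse_spec : Claim_equal_step8_ngram_collapse := by
  intro tokens _
  unfold Spec_step8_ngram_collapse step8_ngram_collapse step8_ngram_collapse_alt
  rw [pvMain tokens tokens.length 0 [] (by omega)]
  rfl
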